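-- pv_equiv track=rewrite | github.com/pypi-data/pypi-mirror-403 | packages/termgrid/termgrid-0.0.1.tar.gz/termgrid-0.0.1/termgrid/grid.py | _binary_list_to_grid
-- ===== SOURCE A (Python) =====
-- from typing import List, Literal, Callable, Optional
--
-- BinaryMatrix = List[List[Literal[0, 1]]]
--
-- GRID_DICT = {chr(code): [[1 if (code & c) else 0 for c in r] for r in [[0x01, 0x08], [0x02, 0x10], [0x04, 0x20], [0x40, 0x80]]] for code in range(0x2800, 0x28FF + 1)}
--
-- def _binary_list_to_grid(binary_list: BinaryMatrix) -> str:
--     grid_text = ""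
--     GRID_ROWS = 4  # 盲文点阵行数
--     GRID_COLS = 2  # 盲文点阵列数
--
--     total_rows = len(binary_list)
--     if total_rows == 0:
--         return ""
--     total_cols = len(binary_list[0])
--
--     # 先把字典反转成「点阵元组: 字符」的临时映射（仅做一次，提升效率）
--     # 本质是用字典推导式实现"get"匹配的核心逻辑
--     pattern_to_char = {tuple(tuple(row) for row in pat): char for char, pat in GRID_DICT.items()}
--
--     # 按4行2列分块处理
--     for row_start in range(0, total_rows, GRID_ROWS):
--         # 读取/补全4行
--         row_block = []
--         for i in range(GRID_ROWS):
--             if row_start + i < total_rows: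
--                 row_block.append(binary_list[row_start + i].copy())
--             else:
--                 row_block.append([0] * total_cols)
--
--         # 按2列拆分，匹配字符
--         for col_start in range(0, total_cols, GRID_COLS):
--             # 提取/补全2列，生成4×2的点阵块
--             grid_pattern = []
--             for row in row_block:
--                 col_slice: list = row[col_start:col_start + GRID_COLS]
--                 while len(col_slice) < GRID_COLS:
--                     col_slice.append(0)
--                 grid_pattern.append(col_slice)
--
--             # 转元组后用get匹配（核心！替代反向字典）
--             pattern_tuple = tuple(tuple(row) for row in grid_pattern)
--             grid_char = pattern_to_char.get(pattern_tuple, '⠀')  # 找不到则用空盲文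
--             grid_text += grid_char
--
--         grid_text += "\n"  # 行块结束换行
--     return grid_text
-- ===== SOURCE B (Python) =====
-- def _binary_list_to_grid(binary_list):
--     """Render a bit matrix as braille text: one character per 4x2 block
--     (short blocks are padded with 0), one text line per band of 4 rows.
--     A cell equal to 1 raises the corresponding braille dot; a block that
--     contains any value other than 0 or 1 has no dot pattern and renders
--     as the blank braille character."""
--     if not binary_list:
--         return ""
--     n = len(binary_list)
--     m = len(binary_list[0])
--     DOT = [[0x01, 0x08], [0x02, 0x10], [0x04, 0x20], [0x40, 0x80]]
--     BLANK = "\u2800"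
--
--     def cell(r, c):
--         return binary_list[r][c] if r < n and c < len(binary_list[r]) else 0
--
--     def block_char(cells):
--         code = 0
--         for v, w in cells:
--             if v == 1:
--                 code += w
--             elif v != 0:
--                 return BLANK
--         return chr(0x2800 + code)
--
--     lines = []
--     for r0 in range(0, n, 4):
--         row = []
--         for c0 in range(0, m, 2):
--             cells = [(cell(r0 + i, c0 + j), DOT[i][j]) for i in range(4) for j in range(2)]
--             row.append(block_char(cells))
--         lines.append("".join(row) + "\n")
--     return "".join(lines)
-- ===== Notes on version B (the rewrite author's own statement) =====
-- stated objective: simpler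
-- what changed: B deletes the 256-entry braille dictionary and its reverse tuple-key mapping entirely: each 4x2 block is rendered by summing fixed dot weights over its 1-cells (chr(0x2800 + code)), with an early return of the blank braille character as soon as a cell is neither 0 nor 1, instead of building GRID_DICT, inverting it, and doing padded tuple-key lookups.
import Mathlib
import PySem

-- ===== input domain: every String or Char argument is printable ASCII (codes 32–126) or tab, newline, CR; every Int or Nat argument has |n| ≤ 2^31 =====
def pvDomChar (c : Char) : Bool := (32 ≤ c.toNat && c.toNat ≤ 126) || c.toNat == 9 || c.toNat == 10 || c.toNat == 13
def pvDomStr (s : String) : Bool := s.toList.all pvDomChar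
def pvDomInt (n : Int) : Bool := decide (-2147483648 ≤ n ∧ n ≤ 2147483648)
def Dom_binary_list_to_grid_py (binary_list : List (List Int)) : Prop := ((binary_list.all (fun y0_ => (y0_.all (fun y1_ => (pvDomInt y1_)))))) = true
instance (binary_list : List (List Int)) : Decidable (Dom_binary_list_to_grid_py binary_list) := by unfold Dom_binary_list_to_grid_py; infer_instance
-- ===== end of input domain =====

-- B replaces A's 256-entry reverse braille dictionary by direct dot-weight arithmetic per 4x2 block, blank as soon as a cell is not a bit (objective: simpler).


-- ===== PORT A =====
-- module-level GRID_DICT = {chr(code): pattern for code in range(0x2800, 0x28FF+1)}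
def pvGridDict : PySem.Dict Char (List (List Int)) :=
  (PySem.List.pyRange 0x2800 0x2900 1).foldl
    (fun d code =>
      d.insert (Char.ofNat code.toNat)  -- chr(code); code is in [0x2800, 0x28FF], exact
        ([[0x01, 0x08], [0x02, 0x10], [0x04, 0x20], [0x40, 0x80]].map
          (fun r => r.map (fun c => if PySem.Int.band code c ≠ 0 then (1 : Int) else 0))))
    PySem.Dict.empty

-- pattern_to_char = {tuple(pat): char for char, pat in GRID_DICT.items()}
def pvPatternToChar : PySem.Dict (List (List Int)) Char :=
  pvGridDict.items.foldl (fun d kv => d.insert kv.2 kv.1) PySem.Dict.empty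

-- 'while len(col_slice) < GRID_COLS: col_slice.append(0)' with GRID_COLS = 2
def pvPadTo2 (l : List Int) : List Int :=
  if l.length < 2 then pvPadTo2 (l ++ [(0 : Int)]) else l
termination_by 2 - l.length
decreasing_by simp_all; omega

def binary_list_to_grid_py (binary_list : List (List Int)) : String :=
  match binary_list with
  | [] => ""            -- total_rows == 0
  | first :: _ =>
    let total_rows : Int := binary_list.length
    let total_cols : Int := first.length
    (PySem.List.pyRange 0 total_rows 4).foldl (fun grid_text row_start =>
      let row_block : List (List Int) :=
        (PySem.List.pyRange 0 4 1).foldl (fun rb i =>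
          if row_start + i < total_rows then
            -- binary_list[row_start + i].copy(); index nonneg and in range
            rb ++ [PySem.List.pyGetD binary_list (row_start + i) []]
          else
            rb ++ [List.replicate total_cols.toNat (0 : Int)])  -- [0] * total_cols, total_cols ≥ 0
        []
      let grid_text :=
        (PySem.List.pyRange 0 total_cols 2).foldl (fun gt col_start =>
          let grid_pattern : List (List Int) :=
            row_block.foldl (fun gp row =>
              gp ++ [pvPadTo2 (PySem.List.slice row (some col_start) (some (col_start + 2)))])
            []
          gt ++ (pvPatternToChar.getD grid_pattern '⠀').toString)
        grid_text
      grid_text ++ "\n")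
    ""

-- ===== PORT B =====
def pvDotB : List (List Int) := [[0x01, 0x08], [0x02, 0x10], [0x04, 0x20], [0x40, 0x80]]

-- cell(r, c): binary_list[r][c] if in bounds else 0 (r, c always ≥ 0 here)
def pvCell (bl : List (List Int)) (r c : Nat) : Int := (bl.getD r []).getD c 0

-- block_char(cells): the 'for v, w in cells' loop with its two early exits
def pvBlockChar (cells : List (Int × Int)) (code : Int) : Char :=
  match cells with
  | [] => Char.ofNat (0x2800 + code.toNat)
  | (v, w) :: rest =>
    if v == 1 then pvBlockChar rest (code + w)
    else if v != 0 then '⠀'            -- BLANK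
    else pvBlockChar rest code

def binary_list_to_grid_py_alt (binary_list : List (List Int)) : String :=
  match binary_list with
  | [] => ""
  | first :: _ =>
    let n : Int := binary_list.length
    let m : Int := first.length
    let lines : List String :=
      (PySem.List.pyRange 0 n 4).foldl (fun lines r0 =>
        let row : List Char :=
          (PySem.List.pyRange 0 m 2).foldl (fun row c0 =>
            let cells : List (Int × Int) :=
              (List.range 4).flatMap (fun i => (List.range 2).map (fun j =>
                (pvCell binary_list (r0.toNat + i) (c0.toNat + j),
                 (pvDotB.getD i []).getD j 0)))
            row ++ [pvBlockChar cells 0])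
          []
        lines ++ [String.ofList row ++ "\n"])
      []
    String.join lines

-- ===== PRECONDITION & SPEC =====
def Spec_binary_list_to_grid_py (binary_list : List (List Int)) (out : String) : Prop := out = binary_list_to_grid_py_alt binary_list
instance (binary_list : List (List Int)) (out : String) : Decidable (Spec_binary_list_to_grid_py binary_list out) := by unfold Spec_binary_list_to_grid_py; infer_instance

-- ===== CLAIM (what is proved, stated in full; the proofs are below) =====
def Claim_equal_binary_list_to_grid_py : Prop := ∀ (binary_list : List (List Int)), Dom_binary_list_to_grid_py binary_list → Spec_binary_list_to_grid_py binary_list (binary_list_to_grid_py binary_list)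

-- ===== LEMMAS AND PROOFS =====

-- the two table facts, proved by a single kernel evaluation of the reversed dictionary
def pvBools : List Int := [0, 1]
def pvCheck (a b c d e f g h : Int) : Bool :=
  pvPatternToChar.getD [[a,b],[c,d],[e,f],[g,h]] '⠀'
    == pvBlockChar [(a,1),(b,8),(c,2),(d,16),(e,4),(f,32),(g,64),(h,128)] 0

set_option maxRecDepth 100000 in
set_option maxHeartbeats 4000000 in
theorem pvTables :
    (∀ a ∈ pvBools, ∀ b ∈ pvBools, ∀ c ∈ pvBools, ∀ d ∈ pvBools, ∀ e ∈ pvBools,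
      ∀ f ∈ pvBools, ∀ g ∈ pvBools, ∀ h ∈ pvBools, pvCheck a b c d e f g h = true)
    ∧ (∀ p ∈ pvPatternToChar.keys, ∀ row ∈ p, ∀ x ∈ row, x = 0 ∨ x = 1) := by
  decide

-- the early-return loop yields BLANK whenever some cell is not a bit
theorem pvBlockChar_blank (cells : List (Int × Int)) (code : Int)
    (h : ∃ vw ∈ cells, vw.1 ≠ 0 ∧ vw.1 ≠ 1) : pvBlockChar cells code = '⠀' := by
  induction cells generalizing code with
  | nil => simp at h
  | cons vw rest ih =>
      obtain ⟨x, hx, hx0, hx1⟩ := h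
      rcases vw with ⟨v, w⟩
      simp only [pvBlockChar]
      by_cases hv1 : v = 1
      · rw [if_pos (by simp [hv1])]
        refine ih _ ⟨x, ?_, hx0, hx1⟩
        rcases List.mem_cons.mp hx with rfl | hm
        · exact absurd hv1 (by simpa using hx1)
        · exact hm
      · rw [if_neg (by simpa using hv1)]
        by_cases hv0 : v = 0
        · rw [if_neg (by simp [hv0])]
          refine ih _ ⟨x, ?_, hx0, hx1⟩
          rcases List.mem_cons.mp hx with rfl | hm
          · exact absurd hv0 (by simpa using hx0)
          · exact hm
        · rw [if_pos (by simpa using hv0)]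

-- the central per-block fact: dictionary lookup = B's early-return dot-weight loop
theorem pvLookup (a b c d e f g h : Int) :
    pvPatternToChar.getD [[a,b],[c,d],[e,f],[g,h]] '⠀'
      = pvBlockChar [(a,1),(b,8),(c,2),(d,16),(e,4),(f,32),(g,64),(h,128)] 0 := by
  by_cases hall : ∀ x ∈ [a,b,c,d,e,f,g,h], x = 0 ∨ x = 1
  · have hm : ∀ x ∈ [a,b,c,d,e,f,g,h], x ∈ pvBools := by
      intro x hx; rcases hall x hx with h1 | h1 <;> simp [pvBools, h1]
    have := pvTables.1 a (hm a (by simp)) b (hm b (by simp)) c (hm c (by simp))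
      d (hm d (by simp)) e (hm e (by simp)) f (hm f (by simp)) g (hm g (by simp))
      h (hm h (by simp))
    simpa [pvCheck] using this
  · push_neg at hall
    obtain ⟨x, hx, hx0, hx1⟩ := hall
    rw [pvBlockChar_blank _ 0 (by
      simp only [List.mem_cons, List.not_mem_nil, or_false] at hx
      rcases hx with rfl | rfl | rfl | rfl | rfl | rfl | rfl | rfl
      · exact ⟨(x,1), by simp, hx0, hx1⟩
      · exact ⟨(x,8), by simp, hx0, hx1⟩
      · exact ⟨(x,2), by simp, hx0, hx1⟩
      · exact ⟨(x,16), by simp, hx0, hx1⟩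
      · exact ⟨(x,4), by simp, hx0, hx1⟩
      · exact ⟨(x,32), by simp, hx0, hx1⟩
      · exact ⟨(x,64), by simp, hx0, hx1⟩
      · exact ⟨(x,128), by simp, hx0, hx1⟩)]
    have hnc : pvPatternToChar.contains [[a,b],[c,d],[e,f],[g,h]] = false := by
      rw [PySem.Dict.contains_eq_decide_mem_keys, decide_eq_false_iff_not]
      intro hmem
      have hkb := pvTables.2 _ hmem
      simp only [List.mem_cons, List.not_mem_nil, or_false] at hx
      rcases hx with rfl | rfl | rfl | rfl | rfl | rfl | rfl | rfl
      · have := hkb [x,b] (by simp) x (by simp); omega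
      · have := hkb [a,x] (by simp) x (by simp); omega
      · have := hkb [x,d] (by simp) x (by simp); omega
      · have := hkb [c,x] (by simp) x (by simp); omega
      · have := hkb [x,f] (by simp) x (by simp); omega
      · have := hkb [e,x] (by simp) x (by simp); omega
      · have := hkb [x,h] (by simp) x (by simp); omega
      · have := hkb [g,x] (by simp) x (by simp); omega
    rw [PySem.Dict.getD_of_not_contains _ _ hnc]

-- pad-of-slice: the two padded entries are getD at k and k+1
theorem pvPad_slice (row : List Int) (k : Nat) :
    pvPadTo2 ((row.drop k).take 2) = [row.getD k 0, row.getD (k + 1) 0] := by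
  have h0 : row.getD k 0 = (row.drop k).getD 0 0 := by
    simp [List.getD_eq_getElem?_getD, List.getElem?_drop]
  have h1 : row.getD (k + 1) 0 = (row.drop k).getD 1 0 := by
    simp [List.getD_eq_getElem?_getD, List.getElem?_drop]
  rw [h0, h1]
  rcases hd : row.drop k with _ | ⟨x, _ | ⟨y, t⟩⟩ <;> simp [pvPadTo2]

-- string-append folds restart from the empty string
theorem pvFoldl_append_str (l : List String) (s : String) :
    l.foldl (· ++ ·) s = s ++ l.foldl (· ++ ·) "" := by
  induction l generalizing s with
  | nil => simp only [List.foldl]; rw [String.append_empty]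
  | cons y ys ih =>
      simp only [List.foldl]
      rw [ih (s ++ y), ih ("" ++ y), String.empty_append, String.append_assoc]

-- String.join distributes over cons
theorem pvJoin_cons (x : String) (xs : List String) :
    String.join (x :: xs) = x ++ String.join xs := by
  show List.foldl (· ++ ·) ("" ++ x) xs = x ++ List.foldl (· ++ ·) "" xs
  rw [String.empty_append, pvFoldl_append_str xs x]

theorem pvChar_toString (c : Char) : c.toString = String.ofList [c] :=
  String.toByteArray_inj.mp rfl

-- a joined list of one-char strings is the string of the chars
theorem pvJoin_chars {α : Type} (L : List α) (f : α → Char) :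
    String.join (L.map fun x => (f x).toString) = String.ofList (L.map f) := by
  induction L with
  | nil => rw [List.map_nil, List.map_nil, String.ofList_nil]; rfl
  | cons x xs ih =>
      simp only [List.map]
      rw [pvJoin_cons, ih, pvChar_toString, ← String.ofList_append, List.singleton_append]

-- a loop 'acc ++ [u x] / acc ++ [v x]' chosen by a test is a map
theorem pvFoldl_ite_append {α β : Type} (l : List α) (p : α → Prop) [DecidablePred p]
    (u v : α → β) (init : List β) :
    l.foldl (fun acc x => if p x then acc ++ [u x] else acc ++ [v x]) init
      = init ++ l.map (fun x => if p x then u x else v x) := by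
  rw [PySem.List.foldl_congr_mem _ _ (fun acc x => acc ++ [if p x then u x else v x]) _
    (by intro acc x _; dsimp only; split <;> rfl)]
  exact PySem.List.foldl_append_singleton_eq_map _ _ _

-- a string-building loop appending one string per element
theorem pvFoldl_str {α : Type} (R : List α) (s : String) (G : α → String) :
    R.foldl (fun acc r => acc ++ G r) s = s ++ String.join (R.map G) := by
  induction R generalizing s with
  | nil => rw [List.map_nil]; show s = s ++ ""; rw [String.append_empty]
  | cons r rs ih =>
      simp only [List.foldl, List.map]
      rw [ih, pvJoin_cons, ← String.append_assoc]

-- one padded block row equals the two cell values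
theorem pvRowCase (bl : List (List Int)) (r c : Int) (hr : 0 ≤ r) (hc : 0 ≤ c) (mm : Nat) :
    pvPadTo2 (PySem.List.slice
        (if r < (bl.length : Int) then PySem.List.pyGetD bl r [] else List.replicate mm (0 : Int))
        (some c) (some (c + 2)))
      = [pvCell bl r.toNat c.toNat, pvCell bl r.toNat (c.toNat + 1)] := by
  have hslice : ∀ row : List Int,
      PySem.List.slice row (some c) (some (c + 2)) = (row.drop c.toNat).take 2 := by
    intro row; rw [PySem.List.slice_toNat row hc (by omega)]; congr 1; omega
  by_cases h : r < (bl.length : Int)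
  · rw [if_pos h, hslice, pvPad_slice]
    have hrow : PySem.List.pyGetD bl r [] = bl.getD r.toNat [] := by
      rw [PySem.List.pyGetD_eq_getElem bl [] hr (by exact_mod_cast h)]
      rw [List.getD_eq_getElem?_getD, List.getElem?_eq_getElem (by omega)]; rfl
    rw [hrow]; rfl
  · rw [if_neg h, hslice, pvPad_slice]
    have hcell : ∀ k : Nat, pvCell bl r.toNat k = 0 := by
      intro k
      unfold pvCell
      rw [List.getD_eq_default bl [] (by omega)]
      rfl
    have hrep : ∀ k : Nat, (List.replicate mm (0 : Int)).getD k 0 = 0 := by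
      intro k
      by_cases hk : k < mm
      · exact List.getD_replicate 0 hk
      · exact List.getD_eq_default _ _ (by simp; omega)
    rw [hcell, hcell, hrep, hrep]

-- ===== VERDICT (by name: the statement is the Claim_ definition above) =====
theorem binary_list_to_grid_py_spec : Claim_equal_binary_list_to_grid_py := by
  intro bl _
  unfold Spec_binary_list_to_grid_py
  cases bl with
  | nil => rfl
  | cons first rest =>
    simp only [binary_list_to_grid_py, binary_list_to_grid_py_alt]
    simp only [PySem.List.foldl_append_singleton_eq_map, List.nil_append,
      String.append_assoc, pvFoldl_str, String.empty_append]
    refine congrArg String.join (List.map_congr_left ?_)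
    intro r0 hr0
    rw [pvJoin_chars]
    refine congrArg (fun z => z ++ "\n") (congrArg String.ofList (List.map_congr_left ?_))
    intro c0 hc0
    have hr0' : (0:Int) ≤ r0 := ((PySem.List.mem_pyRange_iff_of_pos (by norm_num) r0).mp hr0).1
    have hc0' : (0:Int) ≤ c0 := ((PySem.List.mem_pyRange_iff_of_pos (by norm_num) c0).mp hc0).1
    rw [show PySem.List.pyRange 0 4 1 = [(0:Int),1,2,3] from by decide]
    rw [pvFoldl_ite_append]
    simp only [List.nil_append, List.map_cons, List.map_nil]
    rw [pvRowCase (first :: rest) (r0 + 0) c0 (by omega) hc0' _,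
      pvRowCase (first :: rest) (r0 + 1) c0 (by omega) hc0' _,
      pvRowCase (first :: rest) (r0 + 2) c0 (by omega) hc0' _,
      pvRowCase (first :: rest) (r0 + 3) c0 (by omega) hc0' _]
    rw [show ((r0 + 0).toNat = r0.toNat + 0) from by omega,
      show ((r0 + 1).toNat = r0.toNat + 1) from by omega,
      show ((r0 + 2).toNat = r0.toNat + 2) from by omega,
      show ((r0 + 3).toNat = r0.toNat + 3) from by omega]
    simp only [show List.range 4 = [0,1,2,3] from rfl, show List.range 2 = [0,1] from rfl,
      List.flatMap_cons, List.flatMap_nil, List.map_cons, List.map_nil, List.append_nil,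
      List.cons_append, List.nil_append, pvDotB,
      List.getD_cons_zero, List.getD_cons_succ]
    exact pvLookup _ _ _ _ _ _ _ _
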